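-- pv_equiv track=rewrite | github.com/Perfect5th/aoc-2020 | day-6/soln.py | part1
-- ===== SOURCE A (Python) =====
-- qs = [chr(ord('a')+i) for i in range(26)]
--
-- def read_card(ipt):
--     card = ''
--     for l in ipt:
--         if l == '\n':
--             yield card
--             card = ''
--
--         card += l
--
-- def part1(ipt):
--     total = 0
--
--     for card in read_card(ipt):
--         answered = 0
--
--         for q in qs:
--             if q in card:
--                 answered += 1
--
--         total += answered
--
--     return total
-- ===== SOURCE B (Python) =====
-- def part1(ipt):
--     # One pass: maintain a set of this group's lowercase letters; on a '\n'
--     # separator line add its size to the total and reset (trailing group is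
--     # never flushed, matching A's generator).
--     total = 0
--     seen = set()
--     for l in ipt:
--         if l == '\n':
--             total += len(seen)
--             seen = set()
--         else:
--             seen.update(ch for ch in l if 'a' <= ch <= 'z')
--     return total
-- ===== Notes on version B (the rewrite author's own statement) =====
-- stated objective: simpler
-- what changed: B makes a single pass over the lines maintaining a set of the current group's lowercase letters (flushed at each '\n' separator), instead of concatenating each group into a string via a generator and then scanning all 26 alphabet letters with a substring test per group.
import Mathlib
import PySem

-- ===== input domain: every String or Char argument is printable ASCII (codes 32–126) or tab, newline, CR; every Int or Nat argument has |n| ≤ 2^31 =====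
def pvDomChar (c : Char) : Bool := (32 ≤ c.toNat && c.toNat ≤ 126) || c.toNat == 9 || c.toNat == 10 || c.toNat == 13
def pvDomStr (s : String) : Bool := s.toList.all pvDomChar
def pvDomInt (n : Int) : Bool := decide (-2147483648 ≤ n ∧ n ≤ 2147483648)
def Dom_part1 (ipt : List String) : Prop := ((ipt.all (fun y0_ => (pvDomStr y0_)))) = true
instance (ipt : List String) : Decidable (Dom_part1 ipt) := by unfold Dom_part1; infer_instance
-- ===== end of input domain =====

-- B replaces A's generator-plus-26-letter-substring-scan with a single pass keeping a set of the
-- current group's lowercase letters, flushed at each '\n' separator line (objective: simpler).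

-- ===== PORT A =====
-- qs = [chr(ord('a')+i) for i in range(26)]
def qsA : List String :=
  (PySem.List.pyRange 0 26 1).map (fun i => String.ofList [Char.ofNat ('a'.toNat + i.toNat)])

-- read_card's loop body; state = (cards yielded so far, current card)
def readCardStep (st : List String × String) (l : String) : List String × String :=
  let st' := if l == "\n" then (st.1 ++ [st.2], "") else st
  (st'.1, st'.2 ++ l)

-- read_card: the generator, ported eagerly (part1 consumes it fully)
def readCard (ipt : List String) : List String :=
  (ipt.foldl readCardStep ([], "")).1

-- the inner 'for q in qs: if q in card: answered += 1'  ('in' = substring test)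
def cardCount (card : String) : Int :=
  qsA.foldl (fun answered q => if PySem.Str.isIn q card then answered + 1 else answered) 0

def part1 (ipt : List String) : Int :=
  (readCard ipt).foldl (fun total card => total + cardCount card) 0

-- ===== PORT B =====
-- loop body; state = (total, seen); 'seen.update(ch for ch in l if 'a' <= ch <= 'z')'
def altStep (st : Int × PySem.Set Char) (l : String) : Int × PySem.Set Char :=
  if l == "\n" then (st.1 + (st.2.length : Int), PySem.Set.empty)
  else (st.1, st.2.update (l.toList.filter (fun ch => decide ('a' ≤ ch) && decide (ch ≤ 'z'))))

def part1_alt (ipt : List String) : Int :=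
  (ipt.foldl altStep (0, PySem.Set.empty)).1

-- ===== PRECONDITION & SPEC =====
def Spec_part1 (ipt : List String) (out : Int) : Prop := out = part1_alt ipt
instance (ipt : List String) (out : Int) : Decidable (Spec_part1 ipt out) := by unfold Spec_part1; infer_instance

-- ===== CLAIM (what is proved, stated in full; the proofs are below) =====
def Claim_equal_part1 : Prop := ∀ (ipt : List String), Dom_part1 ipt → Spec_part1 ipt (part1 ipt)

-- ===== LEMMAS AND PROOFS =====

def isLow (ch : Char) : Bool := decide ('a' ≤ ch) && decide (ch ≤ 'z')

def alphaChars : List Char := (PySem.List.pyRange 0 26 1).map (fun i => Char.ofNat ('a'.toNat + i.toNat))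

lemma qsA_eq : qsA = alphaChars.map (fun c => String.ofList [c]) := by
  simp [qsA, alphaChars, List.map_map, Function.comp]

lemma singleton_infix_iff (a : Char) (l : List Char) : [a] <:+: l ↔ a ∈ l := by
  constructor
  · intro h; exact h.mem (by simp)
  · intro h; obtain ⟨s, t, rfl⟩ := List.append_of_mem h; exact ⟨s, t, by simp⟩

lemma mem_alphaChars (c : Char) : c ∈ alphaChars ↔ isLow c = true := by
  have halpha : alphaChars = ['a','b','c','d','e','f','g','h','i','j','k','l','m',
      'n','o','p','q','r','s','t','u','v','w','x','y','z'] := by decide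
  rw [halpha]
  constructor
  · intro h
    simp only [List.mem_cons, List.not_mem_nil, or_false] at h
    rcases h with rfl|rfl|rfl|rfl|rfl|rfl|rfl|rfl|rfl|rfl|rfl|rfl|rfl|rfl|rfl|rfl|rfl|rfl|rfl|rfl|rfl|rfl|rfl|rfl|rfl|rfl <;> decide
  · intro h
    simp only [isLow, Bool.and_eq_true, decide_eq_true_eq, Char.le_def,
      UInt32.le_iff_toNat_le] at h
    obtain ⟨n, hn⟩ : ∃ n, c.toNat = n := ⟨_, rfl⟩
    have h1 : 97 ≤ n := hn ▸ h.1
    have h2 : n ≤ 122 := hn ▸ h.2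
    interval_cases n <;> rw [← Char.ofNat_toNat c, hn] <;> decide

lemma foldl_count (p : Char → Bool) (l : List Char) (n : Int) :
    l.foldl (fun a q => if p q then a + 1 else a) n = n + (l.countP p : Int) := by
  induction l generalizing n with
  | nil => simp
  | cons x xs ih =>
    by_cases h : p x = true <;> simp [h, ih] <;> try ring

-- per-card bridge: A's 26-letter scan equals the size of the card's lowercase-letter set
lemma cardCount_eq (card : String) :
    cardCount card = ((PySem.Set.ofList (card.toList.filter isLow)).length : Int) := by
  have h1 : cardCount card
      = ((alphaChars.countP (fun c => PySem.Str.isIn (String.ofList [c]) card) : Nat) : Int) := by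
    rw [cardCount, qsA_eq, List.foldl_map,
      foldl_count (fun c => PySem.Str.isIn (String.ofList [c]) card) alphaChars 0]
    simp
  rw [h1]
  have hmem : ∀ c : Char, PySem.Str.isIn (String.ofList [c]) card = true ↔ c ∈ card.toList := by
    intro c
    rw [PySem.Str.isIn_iff_infix]
    simpa using singleton_infix_iff c card.toList
  -- both sides are the length of a nodup list with the same members
  have hL : (alphaChars.filter (fun c => PySem.Str.isIn (String.ofList [c]) card)).Nodup :=
    (by decide : alphaChars.Nodup).filter _
  have hR : (PySem.Set.ofList (card.toList.filter isLow)).Nodup := PySem.Set.nodup_ofList _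
  have hfs : (alphaChars.filter (fun c => PySem.Str.isIn (String.ofList [c]) card)).toFinset
      = (PySem.Set.ofList (card.toList.filter isLow)).toFinset := by
    ext c
    simp only [List.mem_toFinset, List.mem_filter, PySem.Set.mem_ofList, hmem,
      mem_alphaChars]
    tauto
  have hcard := congrArg Finset.card hfs
  rw [List.toFinset_card_of_nodup hL, List.toFinset_card_of_nodup hR] at hcard
  rw [List.countP_eq_length_filter, hcard]

lemma set_ofList_append (xs ys : List Char) :
    PySem.Set.ofList (xs ++ ys) = PySem.Set.update (PySem.Set.ofList xs) ys := by
  rw [PySem.Set.ofList_eq_foldl, PySem.Set.ofList_eq_foldl, List.foldl_append]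
  rfl

lemma readCardStep_newline (cards : List String) (card : String) :
    readCardStep (cards, card) "\n" = (cards ++ [card], "" ++ "\n") := rfl

lemma readCardStep_other (cards : List String) (card l : String) (h : (l == "\n") = false) :
    readCardStep (cards, card) l = (cards, card ++ l) := by
  simp [readCardStep, h]

lemma altStep_newline (total : Int) (seen : PySem.Set Char) :
    altStep (total, seen) "\n" = (total + (seen.length : Int), PySem.Set.empty) := rfl

lemma altStep_other (total : Int) (seen : PySem.Set Char) (l : String) (h : (l == "\n") = false) :
    altStep (total, seen) l
      = (total, seen.update (l.toList.filter (fun ch => decide ('a' ≤ ch) && decide (ch ≤ 'z')))) := by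
  simp [altStep, h]

-- loop invariant: B's running (total, seen) tracks A's (cards yielded, current card)
lemma loop_inv (ipt : List String) (cards : List String) (card : String)
    (total : Int) (seen : PySem.Set Char)
    (ht : total = cards.foldl (fun t c => t + cardCount c) 0)
    (hs : seen = PySem.Set.ofList (card.toList.filter isLow)) :
    (ipt.foldl altStep (total, seen)).1
      = ((ipt.foldl readCardStep (cards, card)).1).foldl (fun t c => t + cardCount c) 0 := by
  induction ipt generalizing cards card total seen with
  | nil => simpa using ht
  | cons l rest ih =>
    rw [List.foldl_cons, List.foldl_cons]
    by_cases h : l = "\n"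
    · subst h
      rw [readCardStep_newline, altStep_newline]
      refine ih (cards ++ [card]) ("" ++ "\n") (total + (seen.length : Int)) PySem.Set.empty ?_ ?_
      · rw [List.foldl_append, ← ht]
        simp only [List.foldl_cons, List.foldl_nil]
        congr 1
        rw [cardCount_eq, hs]
      · have hnl : (("" : String) ++ "\n").toList = ['\n'] := by simp
        rw [hnl]
        decide
    · have hbeq : (l == "\n") = false := beq_eq_false_iff_ne.mpr h
      rw [readCardStep_other _ _ _ hbeq, altStep_other _ _ _ hbeq]
      refine ih cards (card ++ l) total _ ht ?_
      rw [hs]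
      show PySem.Set.update _ (l.toList.filter isLow) = _
      rw [← set_ofList_append, ← List.filter_append]
      congr 1
      simp

-- ===== VERDICT (by name: the statement is the Claim_ definition above) =====
theorem part1_spec : Claim_equal_part1 := by
  intro ipt _
  unfold Spec_part1 part1 part1_alt readCard
  rw [loop_inv ipt [] "" 0 PySem.Set.empty (by simp) (by decide)]
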